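-- pv_equiv track=rewrite | github.com/ASSERT-KTH/DepPrune | utils.py | is_key_contains_the_version
-- ===== SOURCE A (Python) =====
-- def transform_string_to_array(input_string, substring):
--     parts = input_string.split(substring)
--     result = [substring + part[:-1] if '/' in part else substring + part for part in parts if part]
--     return result
--
-- def transform_array_with_string(input_array, join_string):
--     output_array = []
--     current_path = ""
--
--     for item in input_array:
--         if current_path:
--             current_path += "/"
--         current_path += item
--         output_array.append(current_path + "/" + join_string)
--
--     return output_array
--
-- def is_key_contains_the_version(json_data, key, target_dep):
--     is_removing = True
--     temp_arr = transform_string_to_array(key, "node_modules/")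
--     output_arr = transform_array_with_string(temp_arr, f"node_modules/{target_dep}")
--     for item in output_arr:
--         if item in json_data["packages"]:
--             is_removing = False
--
--     return is_removing
-- ===== SOURCE B (Python) =====
-- def is_key_contains_the_version(json_data, key, target_dep):
--     nm = "node_modules/"
--     # set of cumulative install-path prefixes derived from `key`
--     prefixes = set()
--     cur = ""
--     for part in key.split(nm):
--         if part:
--             if "/" in part:
--                 part = part[:-1]
--             cur += ("/" if cur else "") + nm + part
--             prefixes.add(cur)
--     suffix = "/" + nm + target_dep
--     n = len(suffix)
--     # reversed traversal: scan the package keys and strip the suffix,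
--     # instead of generating candidate keys and probing the package table
--     for pkg in json_data["packages"]:
--         if pkg.endswith(suffix) and pkg[:-n] in prefixes:
--             return False
--     return True
-- ===== Notes on version B (the rewrite author's own statement) =====
-- stated objective: alternative
-- what changed: B reverses the direction of the search: instead of generating every candidate key (cumulative prefix + '/node_modules/' + target_dep) and probing the packages table as A does, B builds a set of the cumulative prefixes once and then scans the package keys, accepting a key iff it ends with the suffix and its suffix-stripped remainder is in the prefix set.
-- outside the precondition, e.g. on is_key_contains_the_version({}, '', 'a'): A returns True, B raises KeyError
import Mathlib
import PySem

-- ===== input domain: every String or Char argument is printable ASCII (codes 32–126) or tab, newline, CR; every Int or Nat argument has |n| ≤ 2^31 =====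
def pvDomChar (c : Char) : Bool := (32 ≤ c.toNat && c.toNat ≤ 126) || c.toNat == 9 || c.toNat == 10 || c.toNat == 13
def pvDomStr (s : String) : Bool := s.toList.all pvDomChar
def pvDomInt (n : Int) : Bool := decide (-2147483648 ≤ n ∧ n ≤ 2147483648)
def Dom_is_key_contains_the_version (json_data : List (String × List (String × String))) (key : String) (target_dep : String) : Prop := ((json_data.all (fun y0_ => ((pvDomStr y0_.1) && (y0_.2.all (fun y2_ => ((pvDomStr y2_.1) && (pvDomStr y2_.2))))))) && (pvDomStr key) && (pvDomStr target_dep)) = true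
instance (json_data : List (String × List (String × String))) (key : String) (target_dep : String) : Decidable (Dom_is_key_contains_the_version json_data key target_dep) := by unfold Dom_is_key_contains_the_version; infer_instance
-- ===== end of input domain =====

-- B reverses the search direction: it builds a set of cumulative path prefixes from `key`
-- and scans the package keys, suffix-stripping each, instead of generating candidate keys
-- and probing the package table (objective: alternative).

-- ===== PORT A =====
-- Python: parts = input.split(sub); [sub+part[:-1] if '/' in part else sub+part for part in parts if part]
def pv_transform_string_to_array (input_string : List Char) (substring : List Char) : List (List Char) :=
  let parts := PySem.Chars.splitOn input_string substring
  (parts.filter (fun p => !p.isEmpty)).map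
    (fun part => if PySem.Chars.isIn ['/'] part
                 then substring ++ PySem.List.slice part none (some (-1))
                 else substring ++ part)

-- Python loop over input_array with state (current_path, output_array)
def pv_transform_array_with_string (input_array : List (List Char)) (join_string : List Char) : List (List Char) :=
  (input_array.foldl
    (fun (st : List Char × List (List Char)) item =>
      let cp := if !st.1.isEmpty then st.1 ++ ['/'] else st.1
      let cp := cp ++ item
      (cp, st.2 ++ [cp ++ ['/'] ++ join_string]))
    ([], [])).2

def is_key_contains_the_version (json_data : List (String × List (String × String))) (key : String) (target_dep : String) : Bool :=
  -- json_data["packages"]: first-match lookup; KeyError (none) is excluded by Pre_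
  let packages := (json_data.lookup "packages").getD []
  let temp_arr := pv_transform_string_to_array key.toList "node_modules/".toList
  let output_arr := pv_transform_array_with_string temp_arr ("node_modules/".toList ++ target_dep.toList)
  output_arr.foldl
    (fun is_removing item =>
      if (packages.map Prod.fst).contains (String.ofList item) then false else is_removing)
    true

-- ===== PORT B =====
-- B's first loop: build the set of cumulative prefixes from the split parts
def pv_alt_prefixes (nm : List Char) (cur : List Char) (s : PySem.Set (List Char)) : List (List Char) → PySem.Set (List Char)
  | [] => s
  | part :: rest =>
    if part.isEmpty then pv_alt_prefixes nm cur s rest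
    else
      let part := if PySem.Chars.isIn ['/'] part then PySem.List.slice part none (some (-1)) else part
      let cur := cur ++ (if !cur.isEmpty then ['/'] else []) ++ nm ++ part
      pv_alt_prefixes nm cur (PySem.Set.add s cur) rest

-- B's second loop: scan the package keys, strip the suffix, test the prefix set
def pv_alt_scan (prefixes : PySem.Set (List Char)) (suffix : List Char) : List (List Char) → Bool
  | [] => true
  | pkg :: rest =>
    if PySem.Chars.endswith pkg suffix
        && PySem.Set.contains prefixes (PySem.List.slice pkg none (some (-(suffix.length : Int))))
    then false
    else pv_alt_scan prefixes suffix rest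

def is_key_contains_the_version_alt (json_data : List (String × List (String × String))) (key : String) (target_dep : String) : Bool :=
  let nm := "node_modules/".toList
  let prefixes := pv_alt_prefixes nm [] PySem.Set.empty (PySem.Chars.splitOn key.toList nm)
  let suffix := ['/'] ++ nm ++ target_dep.toList
  pv_alt_scan prefixes suffix (((json_data.lookup "packages").getD []).map (fun p => p.1.toList))

-- ===== PRECONDITION & SPEC =====
-- Pre_ excludes inputs without a "packages" key: there A raises KeyError whenever the key
-- string yields a candidate, and on the no-candidate corner (A returns True because it only
-- subscripts json_data inside the loop) B's natural up-front lookup raises KeyError itself.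
def Pre_is_key_contains_the_version (json_data : List (String × List (String × String))) (key : String) (target_dep : String) : Prop :=
  (json_data.map Prod.fst).contains "packages" = true
instance (json_data : List (String × List (String × String))) (key : String) (target_dep : String) : Decidable (Pre_is_key_contains_the_version json_data key target_dep) := by unfold Pre_is_key_contains_the_version; infer_instance

def pvWitness_is_key_contains_the_version : (List (String × List (String × String))) × String × String :=
  ([("packages", [("node_modules/a", "1.0.0")])], "node_modules/a", "b")

def Spec_is_key_contains_the_version (json_data : List (String × List (String × String))) (key : String) (target_dep : String) (out : Bool) : Prop := out = is_key_contains_the_version_alt json_data key target_dep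
instance (json_data : List (String × List (String × String))) (key : String) (target_dep : String) (out : Bool) : Decidable (Spec_is_key_contains_the_version json_data key target_dep out) := by unfold Spec_is_key_contains_the_version; infer_instance

-- ===== CLAIM (what is proved, stated in full; the proofs are below) =====
def Claim_equal_is_key_contains_the_version : Prop := ∀ (json_data : List (String × List (String × String))) (key : String) (target_dep : String), Dom_is_key_contains_the_version json_data key target_dep → Pre_is_key_contains_the_version json_data key target_dep → Spec_is_key_contains_the_version json_data key target_dep (is_key_contains_the_version json_data key target_dep)

-- ===== LEMMAS AND PROOFS =====

-- cumulative prefixes produced by the '/'-joined accumulation, as a structural recursion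
def pvPrefs (cp : List Char) : List (List Char) → List (List Char)
  | [] => []
  | x :: xs =>
    let cp' := (if !cp.isEmpty then cp ++ ['/'] else cp) ++ x
    cp' :: pvPrefs cp' xs

theorem pv_taw_eq_prefs_map (js : List Char) (items : List (List Char)) (cp : List Char) (out : List (List Char)) :
    (items.foldl
      (fun (st : List Char × List (List Char)) item =>
        let c := if !st.1.isEmpty then st.1 ++ ['/'] else st.1
        let c := c ++ item
        (c, st.2 ++ [c ++ ['/'] ++ js]))
      (cp, out)).2 = out ++ (pvPrefs cp items).map (fun p => p ++ ['/'] ++ js) := by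
  induction items generalizing cp out with
  | nil => simp [pvPrefs]
  | cons x xs ih =>
    rw [List.foldl_cons]
    simp only []
    rw [ih]
    simp [pvPrefs, List.append_assoc]

theorem pv_scan_eq_not_any (mem : List Char → Bool) (xs : List (List Char)) (acc : Bool) :
    xs.foldl (fun b item => if mem item then false else b) acc = (acc && !(xs.any mem)) := by
  induction xs generalizing acc with
  | nil => simp
  | cons x xs ih =>
    rw [List.foldl_cons]
    by_cases h : mem x = true
    · rw [show (if mem x = true then false else acc) = false from by simp [h], ih]
      simp [h]
    · rw [show (if mem x = true then false else acc) = acc from by simp [h], ih]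
      simp [h]

-- membership in the prefix set B builds
theorem pv_mem_alt_prefixes (nm : List Char) (parts : List (List Char)) (cur : List Char) (s : PySem.Set (List Char)) (x : List Char) :
    x ∈ pv_alt_prefixes nm cur s parts ↔
      x ∈ s ∨ x ∈ pvPrefs cur
        ((parts.filter (fun p => !p.isEmpty)).map
          (fun part => if PySem.Chars.isIn ['/'] part
                       then nm ++ PySem.List.slice part none (some (-1))
                       else nm ++ part)) := by
  induction parts generalizing cur s with
  | nil => simp [pv_alt_prefixes, pvPrefs]
  | cons p rest ih =>
    by_cases hp : p.isEmpty
    · have hfilter : List.filter (fun p => !p.isEmpty) (p :: rest) = List.filter (fun p => !p.isEmpty) rest := by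
        simp [hp]
      rw [pv_alt_prefixes, if_pos hp, hfilter, ih]
    · have hfilter : List.filter (fun p => !p.isEmpty) (p :: rest) = p :: List.filter (fun p => !p.isEmpty) rest := by
        simp [hp]
      rw [pv_alt_prefixes, if_neg hp, hfilter, List.map_cons]
      have hstep :
          cur ++ (if !cur.isEmpty then ['/'] else []) ++ nm ++
              (if PySem.Chars.isIn ['/'] p then PySem.List.slice p none (some (-1)) else p)
            = (if !cur.isEmpty then cur ++ ['/'] else cur) ++
              (if PySem.Chars.isIn ['/'] p
               then nm ++ PySem.List.slice p none (some (-1))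
               else nm ++ p) := by
        by_cases hc : cur.isEmpty <;> by_cases hm : PySem.Chars.isIn ['/'] p <;>
          simp [hc, hm, List.append_assoc]
      rw [ih, PySem.Set.mem_add]
      simp only [pvPrefs, hstep, List.mem_cons]
      tauto

-- B's scan as a not-any
theorem pv_alt_scan_eq (prefixes : PySem.Set (List Char)) (suffix : List Char) (keys : List (List Char)) :
    pv_alt_scan prefixes suffix keys =
      !(keys.any (fun pkg =>
          PySem.Chars.endswith pkg suffix
            && PySem.Set.contains prefixes (PySem.List.slice pkg none (some (-(suffix.length : Int)))))) := by
  induction keys with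
  | nil => simp [pv_alt_scan]
  | cons k rest ih =>
    cases hb : (PySem.Chars.endswith k suffix
        && PySem.Set.contains prefixes (PySem.List.slice k none (some (-(suffix.length : Int))))) with
    | true => rw [pv_alt_scan, if_pos hb, List.any_cons, hb]; simp
    | false => rw [pv_alt_scan, if_neg (fun hc => by rw [hc] at hb; exact absurd hb (by decide)), List.any_cons, hb, ih]; simp

-- pointwise: "ends with suffix and the stripped remainder is a known prefix" ↔ "is prefix ++ suffix for a known prefix"
theorem pv_strip_iff (pkg suffix : List Char) (hs : suffix ≠ []) (ps : List (List Char)) :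
    (PySem.Chars.endswith pkg suffix = true ∧
       PySem.List.slice pkg none (some (-(suffix.length : Int))) ∈ ps)
      ↔ ∃ p ∈ ps, pkg = p ++ suffix := by
  have hk : 0 < suffix.length := List.length_pos_iff.mpr hs
  have hslice : PySem.List.slice pkg none (some (-(suffix.length : Int))) = pkg.take (pkg.length - suffix.length) :=
    PySem.List.slice_to_neg_natCast pkg suffix.length hk
  constructor
  · rintro ⟨hend, hmem⟩
    obtain ⟨q, hq⟩ := (PySem.Chars.endswith_iff pkg suffix).mp hend
    refine ⟨pkg.take (pkg.length - suffix.length), by rwa [hslice] at hmem, ?_⟩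
    subst hq
    simp
  · rintro ⟨p, hp, rfl⟩
    refine ⟨(PySem.Chars.endswith_iff _ _).mpr ⟨p, rfl⟩, ?_⟩
    rw [hslice]
    simpa using hp

-- the two scan directions find the same matches
theorem pv_exchange (ps : List (List Char)) (sfx : List Char) (hs : sfx ≠ []) (pkgs : List (String × String)) :
    (∃ x ∈ ps, ∃ a ∈ pkgs, a.1 = String.ofList (x ++ sfx)) ↔
      (∃ a ∈ pkgs, PySem.Chars.endswith a.1.toList sfx = true ∧
        PySem.List.slice a.1.toList none (some (-(sfx.length : Int))) ∈ ps) := by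
  constructor
  · rintro ⟨p, hp, a, ha, hae⟩
    refine ⟨a, ha, ?_⟩
    have hlist : a.1.toList = p ++ sfx := by rw [hae]; simp
    rw [hlist]
    exact (pv_strip_iff (p ++ sfx) sfx hs ps).mpr ⟨p, hp, rfl⟩
  · rintro ⟨a, ha, hend, hmem⟩
    obtain ⟨p, hp, hpk⟩ := (pv_strip_iff a.1.toList sfx hs ps).mp ⟨hend, hmem⟩
    refine ⟨p, hp, a, ha, ?_⟩
    rw [← hpk]
    simp

-- ===== VERDICT (by name: the statement is the Claim_ definition above) =====
theorem is_key_contains_the_version_spec : Claim_equal_is_key_contains_the_version := by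
  intro json_data key target_dep _ _
  unfold Spec_is_key_contains_the_version
  unfold is_key_contains_the_version is_key_contains_the_version_alt
    pv_transform_string_to_array pv_transform_array_with_string
  simp only [pv_scan_eq_not_any, pv_alt_scan_eq, Bool.true_and]
  rw [pv_taw_eq_prefs_map]
  simp only [List.nil_append]
  congr 1
  rw [Bool.eq_iff_iff]
  simp only [List.any_map, List.any_eq_true, PySem.Set.empty,
    List.contains_eq_mem, List.mem_map, List.append_assoc]
  simp only [Function.comp, Bool.and_eq_true, PySem.Set.contains_iff,
    pv_mem_alt_prefixes, List.not_mem_nil, false_or, decide_eq_true_eq]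
  exact pv_exchange _ _ (by simp) _
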